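-- pv_equiv track=rewrite | github.com/jiaohuix/STACL_Paddle | reader/stream_reader.py | get_src_real_read
-- ===== SOURCE A (Python) =====
-- def get_src_real_read(stream_output):
--     '''get src data and real read'''
--     filter_src = []
--     real_read = []  # real incremental number of read before reading this line
--     for talk in stream_output:  # talk含所有的stream（多行增长的话）
--         for stream in talk:
--             filter_src.append([])
--             real_read.append([0])
--             for idx, s in enumerate(stream):  # 第idx个sample，s是一行
--                 real_read[-1][-1] += 1
--                 if len(s) > 0:
--                     filter_src[-1].append(s)
--                     if idx < len(stream) - 1:
--                         real_read[-1].append(0)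
--     return filter_src,real_read
-- ===== SOURCE B (Python) =====
-- def get_src_real_read(stream_output):
--     '''get src data and real read'''
--     filter_src = []
--     real_read = []
--     for talk in stream_output:
--         for stream in talk:
--             n = len(stream)
--             filter_src.append([s for s in stream if len(s) > 0])
--             breaks = [idx for idx, s in enumerate(stream) if len(s) > 0 and idx < n - 1]
--             gaps = []
--             prev = -1
--             for b in breaks:
--                 gaps.append(b - prev)
--                 prev = b
--             gaps.append(n - 1 - prev)
--             real_read.append(gaps)
--     return filter_src, real_read
-- ===== Notes on version B (the rewrite author's own statement) =====
-- stated objective: alternative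
-- what changed: Replaces A's fused pass that mutates the last counter cell of real_read while reading each line with a per-stream decomposition: filter the nonempty lines, collect the break indices via enumerate, then emit the counters as consecutive index differences plus a closing segment.
import Mathlib
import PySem

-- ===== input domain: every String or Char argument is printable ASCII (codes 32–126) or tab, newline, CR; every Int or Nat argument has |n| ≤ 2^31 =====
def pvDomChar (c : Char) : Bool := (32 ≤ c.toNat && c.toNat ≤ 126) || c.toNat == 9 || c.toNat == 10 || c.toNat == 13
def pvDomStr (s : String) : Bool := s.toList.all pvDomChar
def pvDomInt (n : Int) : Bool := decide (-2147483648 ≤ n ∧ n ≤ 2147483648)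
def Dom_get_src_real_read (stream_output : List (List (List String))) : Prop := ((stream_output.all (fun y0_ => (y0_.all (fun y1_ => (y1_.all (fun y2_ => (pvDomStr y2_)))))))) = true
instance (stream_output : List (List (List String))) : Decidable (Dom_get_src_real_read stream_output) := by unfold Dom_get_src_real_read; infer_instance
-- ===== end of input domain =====

-- B replaces A's fused counter-mutating pass by a filter + break-indices + index-differences
-- decomposition of each stream (objective: alternative; same cost).

-- ===== PORT A =====
-- `real_read[-1][-1] += 1` : the per-stream lists are built locally; the read-counter list is
-- kept REVERSED (head = last cell) so the in-place increment is `pvIncHead`, reversed at the end.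
def pvIncHead : List Int → List Int
  | [] => []
  | x :: xs => (x + 1) :: xs

def pvAGo (n : Int) (i : Int) : List String → List String → List Int → List String × List Int
  | [], srcRev, readRev => (srcRev.reverse, readRev.reverse)
  | s :: rest, srcRev, readRev =>
    let readRev := pvIncHead readRev
    if 0 < s.length then
      let srcRev := s :: srcRev
      if i < n - 1 then pvAGo n (i + 1) rest srcRev (0 :: readRev)
      else pvAGo n (i + 1) rest srcRev readRev
    else pvAGo n (i + 1) rest srcRev readRev

-- A appends `[]` / `[0]` and then mutates only those last elements inside the stream loop;
-- ported as a local per-stream computation appended once finished.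
def get_src_real_read (stream_output : List (List (List String))) : List (List String) × List (List Int) :=
  stream_output.foldl (fun acc talk =>
    talk.foldl (fun (acc : List (List String) × List (List Int)) stream =>
      let r := pvAGo (stream.length : Int) 0 stream [] [0]
      (acc.1 ++ [r.1], acc.2 ++ [r.2])) acc) ([], [])

-- ===== PORT B =====
def pvBStream (stream : List String) : List String × List Int :=
  let n : Int := stream.length
  let filtered := stream.filter (fun s => decide (0 < s.length))
  let breaks := (PySem.List.enumerate stream).filterMap
    (fun p => if 0 < p.2.length ∧ p.1 < n - 1 then some p.1 else none)
  let st := breaks.foldl (fun (st : List Int × Int) b => (st.1 ++ [b - st.2], b)) ([], -1)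
  (filtered, st.1 ++ [n - 1 - st.2])

def get_src_real_read_alt (stream_output : List (List (List String))) : List (List String) × List (List Int) :=
  stream_output.foldl (fun acc talk =>
    talk.foldl (fun (acc : List (List String) × List (List Int)) stream =>
      let r := pvBStream stream
      (acc.1 ++ [r.1], acc.2 ++ [r.2])) acc) ([], [])

-- ===== PRECONDITION & SPEC =====
def Spec_get_src_real_read (stream_output : List (List (List String))) (out : List (List String) × List (List Int)) : Prop := out = get_src_real_read_alt stream_output
instance (stream_output : List (List (List String))) (out : List (List String) × List (List Int)) : Decidable (Spec_get_src_real_read stream_output out) := by unfold Spec_get_src_real_read; infer_instance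

-- ===== CLAIM (what is proved, stated in full; the proofs are below) =====
def Claim_equal_get_src_real_read : Prop := ∀ (stream_output : List (List (List String))), Dom_get_src_real_read stream_output → Spec_get_src_real_read stream_output (get_src_real_read stream_output)

-- ===== LEMMAS AND PROOFS =====

/-- add `c` to the first element (if any) -/
def pvAddFst (c : Int) : List Int → List Int
  | [] => []
  | x :: xs => (c + x) :: xs

/-- common spec of the per-stream read counters -/
def pvG : List String → List Int
  | [] => [0]
  | s :: rest => if 0 < s.length ∧ rest ≠ [] then 1 :: pvG rest else pvAddFst 1 (pvG rest)

/-- recursive form of B's break-index list -/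
def pvBk (n : Int) (i : Int) : List String → List Int
  | [] => []
  | s :: rest => if 0 < s.length ∧ i < n - 1 then i :: pvBk n (i + 1) rest else pvBk n (i + 1) rest

/-- recursive form of B's difference fold -/
def pvDiffs (prev : Int) : List Int → List Int × Int
  | [] => ([], prev)
  | b :: bs => let r := pvDiffs b bs; ((b - prev) :: r.1, r.2)

def pvGaps (n prev : Int) (bs : List Int) : List Int :=
  (pvDiffs prev bs).1 ++ [n - 1 - (pvDiffs prev bs).2]

theorem pvG_ne_nil (l : List String) : pvG l ≠ [] := by
  cases l with
  | nil => simp [pvG]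
  | cons s rest =>
    simp only [pvG]
    split
    · simp
    · cases h : pvG rest with
      | nil => exact absurd h (pvG_ne_nil rest)
      | cons x xs => simp [pvAddFst]

theorem pvAddFst_addFst (a b : Int) (xs : List Int) :
    pvAddFst a (pvAddFst b xs) = pvAddFst (a + b) xs := by
  cases xs with
  | nil => simp [pvAddFst]
  | cons x t => simp [pvAddFst]; ring

theorem pvAddFst_zero {xs : List Int} (h : xs ≠ []) : pvAddFst 0 xs = xs := by
  cases xs with
  | nil => simp at h
  | cons x t => simp [pvAddFst]

theorem pvAGo_eq (l : List String) : ∀ (i : Int) (srcRev : List String) (c : Int) (cs : List Int),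
    pvAGo (i + l.length) i l srcRev (c :: cs)
      = (srcRev.reverse ++ l.filter (fun s => decide (0 < s.length)),
         cs.reverse ++ pvAddFst c (pvG l)) := by
  induction l with
  | nil =>
    intro i srcRev c cs
    simp [pvAGo, pvG, pvAddFst]
  | cons s rest ih =>
    intro i srcRev c cs
    have hn : (i + ((s :: rest).length : Int)) = (i + 1) + (rest.length : Int) := by
      simp; ring
    by_cases hs : 0 < s.length
    · by_cases hr : rest = []
      · subst hr
        have hlt : ¬ i < i + (([s] : List String).length : Int) - 1 := by simp
        simp only [pvAGo, pvIncHead, if_pos hs, if_neg hlt]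
        simp [pvG, pvAddFst, hs]
      · have hlt : i < i + ((s :: rest).length : Int) - 1 := by
          have h1 : 0 < rest.length := List.length_pos_iff.mpr hr
          have : (1:Int) ≤ rest.length := by exact_mod_cast h1
          simp; omega
        simp only [pvAGo, pvIncHead, if_pos hs, if_pos hlt]
        rw [hn, ih (i + 1) (s :: srcRev) 0 ((c + 1) :: cs)]
        rw [pvAddFst_zero (pvG_ne_nil rest)]
        simp [pvG, hs, hr, pvAddFst]
    · simp only [pvAGo, pvIncHead, if_neg hs]
      rw [hn, ih (i + 1) srcRev (c + 1) cs]
      have hg : pvG (s :: rest) = pvAddFst 1 (pvG rest) := by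
        simp [pvG, hs]
      rw [hg, ← pvAddFst_addFst c 1]
      simp [List.filter, hs]

theorem pvBk_enum (l : List String) : ∀ (n i : Int),
    (PySem.List.enumerate l i).filterMap
      (fun p => if 0 < p.2.length ∧ p.1 < n - 1 then some p.1 else none) = pvBk n i l := by
  induction l with
  | nil => intro n i; simp [PySem.List.enumerate_nil, pvBk]
  | cons s rest ih =>
    intro n i
    simp only [PySem.List.enumerate_cons, List.filterMap_cons, pvBk]
    by_cases hc : 0 < s.length ∧ i < n - 1
    · simp only [if_pos hc, ih]
    · simp only [if_neg hc, ih]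

theorem pvGaps_cons (n p b : Int) (bs : List Int) :
    pvGaps n p (b :: bs) = (b - p) :: pvGaps n b bs := by
  simp [pvGaps, pvDiffs]

theorem pvGaps_shift (n p1 p2 : Int) (bs : List Int) :
    pvGaps n p1 bs = pvAddFst (p2 - p1) (pvGaps n p2 bs) := by
  cases bs with
  | nil => simp [pvGaps, pvDiffs, pvAddFst]
  | cons b bs => simp [pvGaps, pvDiffs, pvAddFst]

theorem pvGaps_bk (l : List String) : ∀ (prev : Int),
    pvGaps (prev + 1 + l.length) prev (pvBk (prev + 1 + l.length) (prev + 1) l) = pvG l := by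
  induction l with
  | nil => intro prev; simp [pvBk, pvGaps, pvDiffs, pvG]
  | cons s rest ih =>
    intro prev
    have hn : (prev + 1 + ((s :: rest).length : Int)) = (prev + 1) + 1 + (rest.length : Int) := by
      simp; ring
    by_cases hs : 0 < s.length
    · by_cases hr : rest = []
      · subst hr
        have hlt : ¬ (prev + 1 < prev + 1 + (([s] : List String).length : Int) - 1) := by simp
        have hcond : ¬ (0 < s.length ∧ prev + 1 < prev + 1 + (([s] : List String).length : Int) - 1) := by
          intro h; exact hlt h.2
        simp only [pvBk, if_neg hcond]
        simp [pvGaps, pvDiffs, pvG, pvAddFst, hs]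
      · have hlt : prev + 1 < prev + 1 + ((s :: rest).length : Int) - 1 := by
          have h1 : 0 < rest.length := List.length_pos_iff.mpr hr
          have : (1:Int) ≤ rest.length := by exact_mod_cast h1
          simp; omega
        rw [show pvBk (prev + 1 + ((s :: rest).length : Int)) (prev + 1) (s :: rest)
            = (prev + 1) :: pvBk (prev + 1 + ((s :: rest).length : Int)) (prev + 1 + 1) rest from by
          simp only [pvBk]; rw [if_pos ⟨hs, hlt⟩]]
        rw [pvGaps_cons, hn]
        rw [ih (prev + 1)]
        simp [pvG, hs, hr]
    · have hcond : ¬ (0 < s.length ∧ prev + 1 < prev + 1 + ((s :: rest).length : Int) - 1) := by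
        intro h; exact hs h.1
      rw [show pvBk (prev + 1 + ((s :: rest).length : Int)) (prev + 1) (s :: rest)
          = pvBk (prev + 1 + ((s :: rest).length : Int)) (prev + 1 + 1) rest from by
        simp only [pvBk]; rw [if_neg hcond]]
      rw [hn]
      rw [pvGaps_shift ((prev + 1) + 1 + (rest.length : Int)) prev (prev + 1)
        (pvBk ((prev + 1) + 1 + (rest.length : Int)) (prev + 1 + 1) rest)]
      rw [ih (prev + 1)]
      rw [show (prev + 1 - prev) = (1:Int) from by ring]
      simp [pvG, hs]

theorem pvDiffs_foldl (bs : List Int) : ∀ (acc : List Int) (prev : Int),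
    bs.foldl (fun (st : List Int × Int) b => (st.1 ++ [b - st.2], b)) (acc, prev)
      = (acc ++ (pvDiffs prev bs).1, (pvDiffs prev bs).2) := by
  induction bs with
  | nil => intro acc prev; simp [pvDiffs]
  | cons b bs ih =>
    intro acc prev
    simp only [List.foldl_cons, pvDiffs]
    rw [ih]
    simp

theorem pvStream_eq (stream : List String) :
    pvAGo (stream.length : Int) 0 stream [] [0] = pvBStream stream := by
  have hA := pvAGo_eq stream 0 [] 0 []
  simp only [zero_add] at hA
  rw [hA, pvAddFst_zero (pvG_ne_nil stream)]
  simp only [pvBStream]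
  rw [pvBk_enum stream (stream.length : Int) 0, pvDiffs_foldl]
  have hB := pvGaps_bk stream (-1)
  simp only [show (-1:Int) + 1 = 0 from by ring] at hB
  simp only [pvGaps] at hB
  simp [← hB]

theorem ports_eq (so : List (List (List String))) :
    get_src_real_read so = get_src_real_read_alt so := by
  unfold get_src_real_read get_src_real_read_alt
  simp only [pvStream_eq]

-- ===== VERDICT (by name: the statement is the Claim_ definition above) =====
theorem get_src_real_read_spec : Claim_equal_get_src_real_read := by
  intro so _
  unfold Spec_get_src_real_read
  exact ports_eq so
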